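-- pv_equiv track=rewrite | github.com/MrBrantCode/unitest_baseline | mut_generate/mist_train_taco/taco_17560/solution.py | is_mikomi_string
-- ===== SOURCE A (Python) =====
-- def is_mikomi_string(s: str) -> str:
--     length = len(s)
--     BASE = 100
--     MOD1 = 1000000007
--     MOD2 = 2147483647
--
--     acc1 = 0
--     acc2 = 0
--     hlst1 = [0]
--     hlst2 = [0]
--
--     for c in s:
--         i = ord(c)
--         acc1 = (acc1 * BASE + i) % MOD1
--         acc2 = (acc2 * BASE + i) % MOD2
--         hlst1.append(acc1)
--         hlst2.append(acc2)
--
--     def calc_hash(left, right, xlen):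
--         return ((hlst1[right] - hlst1[left] * pow(BASE, xlen, MOD1)) % MOD1,
--                 (hlst2[right] - hlst2[left] * pow(BASE, xlen, MOD2)) % MOD2)
--
--     for i in range(length // 3, -1, -1):
--         if (length - (i + 1) * 3) % 2:
--             continue
--         alen = i + 1
--         blen = (length - (i + 1) * 3) // 2
--         if blen <= 0:
--             continue
--
--         ha1 = calc_hash(0, alen, alen)
--         ha2 = calc_hash(alen + blen, blen + alen * 2, alen)
--         if ha1 != ha2:
--             continue
--
--         ha3 = calc_hash(blen * 2 + alen * 2, blen * 2 + alen * 3, alen)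
--         if ha1 != ha3:
--             continue
--
--         hb1 = calc_hash(alen, alen + blen, blen)
--         hb2 = calc_hash(blen + alen * 2, blen * 2 + alen * 2, blen)
--         if hb1 != hb2:
--             continue
--
--         return 'Love {}!'.format(s[:i + 1 + blen])
--
--     return 'mitomerarenaiWA'
-- ===== SOURCE B (Python) =====
-- def is_mikomi_string(s: str) -> str:
--     length = len(s)
--     MOD1 = 1000000007
--     MOD2 = 2147483647
--
--     def h(t):
--         a1 = 0
--         a2 = 0
--         for c in t:
--             o = ord(c)
--             a1 = (a1 * 100 + o) % MOD1
--             a2 = (a2 * 100 + o) % MOD2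
--         return (a1, a2)
--
--     for i in range(length // 3, -1, -1):
--         if (length - (i + 1) * 3) % 2:
--             continue
--         alen = i + 1
--         blen = (length - (i + 1) * 3) // 2
--         if blen <= 0:
--             continue
--
--         ha = h(s[0:alen])
--         if ha != h(s[alen + blen:alen * 2 + blen]):
--             continue
--         if ha != h(s[alen * 2 + blen * 2:alen * 3 + blen * 2]):
--             continue
--         if h(s[alen:alen + blen]) != h(s[alen * 2 + blen:alen * 2 + blen * 2]):
--             continue
--
--         return 'Love {}!'.format(s[:i + 1 + blen])
--
--     return 'mitomerarenaiWA'
-- ===== Notes on version B (the rewrite author's own statement) =====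
-- stated objective: simpler
-- what changed: B drops A's prefix-hash tables and pow-based modular subtraction queries and instead hashes each candidate slice directly with one plain fold, comparing the slice hashes.
import Mathlib
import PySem

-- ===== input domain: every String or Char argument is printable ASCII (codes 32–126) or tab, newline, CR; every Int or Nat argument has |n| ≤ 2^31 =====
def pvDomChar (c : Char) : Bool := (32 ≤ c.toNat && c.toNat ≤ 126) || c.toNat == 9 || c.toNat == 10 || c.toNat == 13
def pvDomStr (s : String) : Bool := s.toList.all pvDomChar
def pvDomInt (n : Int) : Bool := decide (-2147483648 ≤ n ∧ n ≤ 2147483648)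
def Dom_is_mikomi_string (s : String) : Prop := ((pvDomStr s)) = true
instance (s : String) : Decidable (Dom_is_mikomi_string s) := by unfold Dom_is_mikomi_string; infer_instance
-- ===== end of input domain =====

-- B replaces A's prefix-hash tables and pow-based subtraction queries by hashing each candidate slice
-- directly with one plain fold (objective: simpler); return values agree on every input.

-- ===== PORT A =====
def pvM1 : Int := 1000000007
def pvM2 : Int := 2147483647

-- the loop body 'for c in s: acc1 = (acc1*BASE+i)%MOD1; …; hlst1.append(acc1); …'
def pvStepA (p : Int × Int × List Int × List Int) (c : Char) : Int × Int × List Int × List Int :=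
  let a1 := PySem.Int.mod (p.1 * 100 + (c.toNat : Int)) pvM1
  let a2 := PySem.Int.mod (p.2.1 * 100 + (c.toNat : Int)) pvM2
  (a1, a2, p.2.2.1 ++ [a1], p.2.2.2 ++ [a2])

-- calc_hash; pow(BASE, xlen, MOD) is ported as 100^xlen % MOD (exact: xlen ≥ 0 at every call site);
-- hlst[k] is ported with pyGetD (every index is in range at every call site)
def pvCalcHash (hl1 hl2 : List Int) (l r xlen : Int) : Int × Int :=
  (PySem.Int.mod (PySem.List.pyGetD hl1 r 0 - PySem.List.pyGetD hl1 l 0 * PySem.Int.mod (100 ^ xlen.toNat) pvM1) pvM1,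
   PySem.Int.mod (PySem.List.pyGetD hl2 r 0 - PySem.List.pyGetD hl2 l 0 * PySem.Int.mod (100 ^ xlen.toNat) pvM2) pvM2)

-- 'for i in range(length//3, -1, -1): …' with the early return as Option-free recursion
def pvLoopA (cs : List Char) (n : Int) (hl1 hl2 : List Int) : List Int → String
  | [] => "mitomerarenaiWA"
  | i :: rest =>
    if PySem.Int.mod (n - (i + 1) * 3) 2 ≠ 0 then pvLoopA cs n hl1 hl2 rest
    else
      let alen := i + 1
      let blen := PySem.Int.floordiv (n - (i + 1) * 3) 2
      if blen ≤ 0 then pvLoopA cs n hl1 hl2 rest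
      else
        let ha1 := pvCalcHash hl1 hl2 0 alen alen
        let ha2 := pvCalcHash hl1 hl2 (alen + blen) (blen + alen * 2) alen
        if ha1 ≠ ha2 then pvLoopA cs n hl1 hl2 rest
        else
          let ha3 := pvCalcHash hl1 hl2 (blen * 2 + alen * 2) (blen * 2 + alen * 3) alen
          if ha1 ≠ ha3 then pvLoopA cs n hl1 hl2 rest
          else
            let hb1 := pvCalcHash hl1 hl2 alen (alen + blen) blen
            let hb2 := pvCalcHash hl1 hl2 (blen + alen * 2) (blen * 2 + alen * 2) blen
            if hb1 ≠ hb2 then pvLoopA cs n hl1 hl2 rest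
            else "Love " ++ String.ofList (PySem.List.slice cs none (some (i + 1 + blen))) ++ "!"

def is_mikomi_string (s : String) : String :=
  let cs := s.toList
  let n : Int := cs.length
  let st := cs.foldl pvStepA (0, 0, [0], [0])
  pvLoopA cs n st.2.2.1 st.2.2.2 (PySem.List.pyRange (PySem.Int.floordiv n 3) (-1) (-1))

-- ===== PORT B =====
-- B's helper h(t): one fold carrying both residues
def pvHashPair (t : List Char) : Int × Int :=
  t.foldl (fun (p : Int × Int) c =>
    (PySem.Int.mod (p.1 * 100 + (c.toNat : Int)) pvM1,
     PySem.Int.mod (p.2 * 100 + (c.toNat : Int)) pvM2)) (0, 0)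

def pvLoopB (cs : List Char) (n : Int) : List Int → String
  | [] => "mitomerarenaiWA"
  | i :: rest =>
    if PySem.Int.mod (n - (i + 1) * 3) 2 ≠ 0 then pvLoopB cs n rest
    else
      let alen := i + 1
      let blen := PySem.Int.floordiv (n - (i + 1) * 3) 2
      if blen ≤ 0 then pvLoopB cs n rest
      else
        let ha := pvHashPair (PySem.List.slice cs (some 0) (some alen))
        if ha ≠ pvHashPair (PySem.List.slice cs (some (alen + blen)) (some (alen * 2 + blen))) then pvLoopB cs n rest
        else if ha ≠ pvHashPair (PySem.List.slice cs (some (alen * 2 + blen * 2)) (some (alen * 3 + blen * 2))) then pvLoopB cs n rest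
        else if pvHashPair (PySem.List.slice cs (some alen) (some (alen + blen))) ≠ pvHashPair (PySem.List.slice cs (some (alen * 2 + blen)) (some (alen * 2 + blen * 2))) then pvLoopB cs n rest
        else "Love " ++ String.ofList (PySem.List.slice cs none (some (i + 1 + blen))) ++ "!"

def is_mikomi_string_alt (s : String) : String :=
  let cs := s.toList
  let n : Int := cs.length
  pvLoopB cs n (PySem.List.pyRange (PySem.Int.floordiv n 3) (-1) (-1))

-- ===== PRECONDITION & SPEC =====
def Spec_is_mikomi_string (s : String) (out : String) : Prop := out = is_mikomi_string_alt s
instance (s : String) (out : String) : Decidable (Spec_is_mikomi_string s out) := by unfold Spec_is_mikomi_string; infer_instance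

-- ===== CLAIM (what is proved, stated in full; the proofs are below) =====
def Claim_equal_is_mikomi_string : Prop := ∀ (s : String), Dom_is_mikomi_string s → Spec_is_mikomi_string s (is_mikomi_string s)

-- ===== LEMMAS AND PROOFS =====

-- single rolling-hash step and hash of a char list, modulus m
def pvHStep (m a : Int) (c : Char) : Int := PySem.Int.mod (a * 100 + (c.toNat : Int)) m
def pvH (m : Int) (t : List Char) : Int := t.foldl (pvHStep m) 0

lemma pvHashPair_aux (t : List Char) : ∀ x y : Int,
    t.foldl (fun (p : Int × Int) c =>
      (PySem.Int.mod (p.1 * 100 + (c.toNat : Int)) pvM1,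
       PySem.Int.mod (p.2 * 100 + (c.toNat : Int)) pvM2)) (x, y)
      = (t.foldl (pvHStep pvM1) x, t.foldl (pvHStep pvM2) y) := by
  induction t with
  | nil => intro x y; rfl
  | cons c v ih => intro x y; simpa [List.foldl, pvHStep] using ih _ _

lemma pvHashPair_eq (t : List Char) : pvHashPair t = (pvH pvM1 t, pvH pvM2 t) := by
  simpa [pvHashPair, pvH] using pvHashPair_aux t 0 0

lemma pvG_bounds (m : Int) (hm : 0 < m) (u : List Char) :
    ∀ a : Int, 0 ≤ a → a < m → 0 ≤ List.foldl (pvHStep m) a u ∧ List.foldl (pvHStep m) a u < m := by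
  induction u with
  | nil => intro a h0 h1; exact ⟨h0, h1⟩
  | cons c v ih =>
    intro a h0 h1
    have : List.foldl (pvHStep m) a (c :: v) = List.foldl (pvHStep m) (pvHStep m a c) v := rfl
    rw [this]
    have hb : 0 ≤ pvHStep m a c ∧ pvHStep m a c < m := by
      unfold pvHStep
      rw [PySem.Int.mod_eq_emod_of_pos hm]
      exact ⟨Int.emod_nonneg _ (ne_of_gt hm), Int.emod_lt_of_pos _ hm⟩
    exact ih _ hb.1 hb.2

lemma pvG_modEq (m : Int) (hm : 0 < m) (u : List Char) :
    ∀ a : Int, List.foldl (pvHStep m) a u ≡ a * 100 ^ u.length + List.foldl (pvHStep m) 0 u [ZMOD m] := by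
  induction u with
  | nil => intro a; simp
  | cons c v ih =>
    intro a
    have hstep : ∀ b : Int, pvHStep m b c ≡ b * 100 + (c.toNat : Int) [ZMOD m] := by
      intro b
      unfold pvHStep
      rw [PySem.Int.mod_eq_emod_of_pos hm]
      exact Int.emod_emod_of_dvd _ dvd_rfl
    calc List.foldl (pvHStep m) a (c :: v)
        = List.foldl (pvHStep m) (pvHStep m a c) v := rfl
      _ ≡ (pvHStep m a c) * 100 ^ v.length + List.foldl (pvHStep m) 0 v [ZMOD m] := ih _
      _ ≡ (a * 100 + (c.toNat : Int)) * 100 ^ v.length + List.foldl (pvHStep m) 0 v [ZMOD m] :=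
          ((hstep a).mul_right _).add_right _
      _ = a * 100 ^ (v.length + 1) + (((0 : Int) * 100 + (c.toNat : Int)) * 100 ^ v.length + List.foldl (pvHStep m) 0 v) := by ring
      _ ≡ a * 100 ^ (v.length + 1) + ((pvHStep m 0 c) * 100 ^ v.length + List.foldl (pvHStep m) 0 v) [ZMOD m] :=
          Int.ModEq.add_left _ (((hstep 0).symm.mul_right _).add_right _)
      _ ≡ a * 100 ^ (v.length + 1) + List.foldl (pvHStep m) (pvHStep m 0 c) v [ZMOD m] :=
          Int.ModEq.add_left _ (ih _).symm
      _ = a * 100 ^ (c :: v).length + List.foldl (pvHStep m) 0 (c :: v) := by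
          simp [List.foldl, List.length_cons]

lemma pvCalc_component (m : Int) (hm : 0 < m) (cs : List Char) (l r : Int)
    (h0 : 0 ≤ l) (hlr : l ≤ r) (hr : r ≤ (cs.length : Int)) :
    PySem.Int.mod (pvH m (cs.take r.toNat) - pvH m (cs.take l.toNat) * PySem.Int.mod (100 ^ (r - l).toNat) m) m
      = pvH m ((cs.drop l.toNat).take (r.toNat - l.toNat)) := by
  set t := cs.take l.toNat with ht
  set u := (cs.drop l.toNat).take (r.toNat - l.toNat) with hu
  have hsplit : cs.take r.toNat = t ++ u := by
    have : r.toNat = l.toNat + (r.toNat - l.toNat) := by omega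
    rw [this, List.take_add]
  have hlen : u.length = (r - l).toNat := by
    simp only [hu, List.length_take, List.length_drop]
    omega
  have happ : pvH m (cs.take r.toNat) ≡ pvH m t * 100 ^ u.length + pvH m u [ZMOD m] := by
    rw [hsplit]
    unfold pvH
    rw [List.foldl_append]
    exact pvG_modEq m hm u (pvH m t)
  have hpow : pvH m t * PySem.Int.mod (100 ^ (r - l).toNat) m ≡ pvH m t * 100 ^ u.length [ZMOD m] := by
    rw [hlen, PySem.Int.mod_eq_emod_of_pos hm]
    exact Int.ModEq.mul_left _ (Int.emod_emod_of_dvd _ dvd_rfl)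
  have hX : pvH m (cs.take r.toNat) - pvH m t * PySem.Int.mod (100 ^ (r - l).toNat) m ≡ pvH m u [ZMOD m] := by
    calc pvH m (cs.take r.toNat) - pvH m t * PySem.Int.mod (100 ^ (r - l).toNat) m
        ≡ (pvH m t * 100 ^ u.length + pvH m u) - pvH m t * 100 ^ u.length [ZMOD m] := happ.sub hpow
      _ = pvH m u := by ring
  have hb := pvG_bounds m hm u 0 le_rfl hm
  rw [PySem.Int.mod_eq_emod_of_pos hm]
  calc (pvH m (cs.take r.toNat) - pvH m t * PySem.Int.mod (100 ^ (r - l).toNat) m) % m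
      = pvH m u % m := hX
    _ = pvH m u := Int.emod_eq_of_lt hb.1 hb.2

lemma pvGetH (m : Int) (cs : List Char) (r : Int) (h0 : 0 ≤ r) (h1 : r ≤ (cs.length : Int)) :
    PySem.List.pyGetD ((List.range (cs.length + 1)).map fun k => pvH m (cs.take k)) r 0
      = pvH m (cs.take r.toNat) := by
  rw [PySem.List.pyGetD_eq_getElem _ 0 h0 (by simp; omega)]
  simp

lemma pvCalcHash_eq (cs : List Char) (l r xlen : Int)
    (h0 : 0 ≤ l) (hlr : l ≤ r) (hr : r ≤ (cs.length : Int)) (hx : xlen = r - l) :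
    pvCalcHash ((List.range (cs.length + 1)).map fun k => pvH pvM1 (cs.take k))
               ((List.range (cs.length + 1)).map fun k => pvH pvM2 (cs.take k)) l r xlen
      = pvHashPair (PySem.List.slice cs (some l) (some r)) := by
  rw [pvHashPair_eq, PySem.List.slice_toNat cs h0 (by omega)]
  unfold pvCalcHash
  rw [pvGetH pvM1 cs r (by omega) hr, pvGetH pvM1 cs l h0 (by omega),
      pvGetH pvM2 cs r (by omega) hr, pvGetH pvM2 cs l h0 (by omega), hx]
  exact Prod.ext
    (pvCalc_component pvM1 (by norm_num [pvM1]) cs l r h0 hlr hr)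
    (pvCalc_component pvM2 (by norm_num [pvM2]) cs l r h0 hlr hr)

lemma pvFoldA_char (t : List Char) :
    t.foldl pvStepA (0, 0, [0], [0]) =
      (pvH pvM1 t, pvH pvM2 t,
       (List.range (t.length + 1)).map (fun k => pvH pvM1 (t.take k)),
       (List.range (t.length + 1)).map (fun k => pvH pvM2 (t.take k))) := by
  induction t using List.reverseRecOn with
  | nil => simp [pvH]
  | append_singleton t c ih =>
    have hstepA : ∀ (x y : Int) (l1 l2 : List Int),
        pvStepA (x, y, l1, l2) c =
          (PySem.Int.mod (x * 100 + (c.toNat : Int)) pvM1,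
           PySem.Int.mod (y * 100 + (c.toNat : Int)) pvM2,
           l1 ++ [PySem.Int.mod (x * 100 + (c.toNat : Int)) pvM1],
           l2 ++ [PySem.Int.mod (y * 100 + (c.toNat : Int)) pvM2]) := fun _ _ _ _ => rfl
    have hH1 : PySem.Int.mod (pvH pvM1 t * 100 + (c.toNat : Int)) pvM1 = pvH pvM1 (t ++ [c]) := by
      simp [pvH, List.foldl_append, pvHStep]
    have hH2 : PySem.Int.mod (pvH pvM2 t * 100 + (c.toNat : Int)) pvM2 = pvH pvM2 (t ++ [c]) := by
      simp [pvH, List.foldl_append, pvHStep]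
    have hmap : ∀ m : Int,
        (List.range (t.length + 1)).map (fun k => pvH m (t.take k)) ++ [pvH m (t ++ [c])]
          = (List.range ((t ++ [c]).length + 1)).map (fun k => pvH m ((t ++ [c]).take k)) := by
      intro m
      conv_rhs => rw [show (t ++ [c]).length + 1 = (t.length + 1) + 1 by simp,
                      List.range_succ, List.map_append]
      congr 1
      · apply List.map_congr_left
        intro k hk
        rw [List.mem_range] at hk
        rw [List.take_append_of_le_length (by omega)]
      · simp only [List.map_cons, List.map_nil]
        rw [List.take_of_length_le (by simp)]
    rw [List.foldl_append, ih, List.foldl_cons, List.foldl_nil, hstepA, hH1, hH2,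
        hmap pvM1, hmap pvM2]

lemma pvLoops_eq (cs : List Char) (L : List Int) (hL : ∀ i ∈ L, 0 ≤ i) :
    pvLoopA cs (cs.length : Int)
      ((List.range (cs.length + 1)).map fun k => pvH pvM1 (cs.take k))
      ((List.range (cs.length + 1)).map fun k => pvH pvM2 (cs.take k)) L
      = pvLoopB cs (cs.length : Int) L := by
  induction L with
  | nil => rfl
  | cons i rest ih =>
    have hi : (0 : Int) ≤ i := hL i (List.mem_cons_self)
    have ih' := ih (fun j hj => hL j (List.mem_cons_of_mem _ hj))
    simp only [pvLoopA, pvLoopB]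
    set n : Int := (cs.length : Int) with hn
    by_cases hpar : PySem.Int.mod (n - (i + 1) * 3) 2 ≠ 0
    · simp only [if_pos hpar, ih']
    · simp only [if_neg hpar]
      push Not at hpar
      set b : Int := PySem.Int.floordiv (n - (i + 1) * 3) 2 with hbdef
      by_cases hb : b ≤ 0
      · simp only [if_pos hb, ih']
      · simp only [if_neg hb]
        push Not at hb
        have hnb : n = 3 * (i + 1) + 2 * b := by
          rw [PySem.Int.mod_eq_emod_of_pos (by norm_num)] at hpar
          rw [PySem.Int.floordiv_eq_ediv_of_pos (by norm_num)] at hbdef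
          omega
        rw [pvCalcHash_eq cs 0 (i + 1) (i + 1) (by omega) (by omega) (by omega) (by ring),
            pvCalcHash_eq cs ((i + 1) + b) (b + (i + 1) * 2) (i + 1) (by omega) (by omega) (by omega) (by ring),
            pvCalcHash_eq cs (b * 2 + (i + 1) * 2) (b * 2 + (i + 1) * 3) (i + 1) (by omega) (by omega) (by omega) (by ring),
            pvCalcHash_eq cs (i + 1) ((i + 1) + b) b (by omega) (by omega) (by omega) (by ring),
            pvCalcHash_eq cs (b + (i + 1) * 2) (b * 2 + (i + 1) * 2) b (by omega) (by omega) (by omega) (by ring)]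
        rw [show b + (i + 1) * 2 = (i + 1) * 2 + b by ring,
            show b * 2 + (i + 1) * 2 = (i + 1) * 2 + b * 2 by ring,
            show b * 2 + (i + 1) * 3 = (i + 1) * 3 + b * 2 by ring,
            ih']

-- ===== VERDICT (by name: the statement is the Claim_ definition above) =====
theorem is_mikomi_string_spec : Claim_equal_is_mikomi_string := by
  intro s _
  simp only [Spec_is_mikomi_string, is_mikomi_string, is_mikomi_string_alt]
  rw [pvFoldA_char]
  exact pvLoops_eq _ _ (fun i hi => by
    have := (PySem.List.mem_pyRange_neg_one.mp hi).1; omega)
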